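-- pv_equiv track=rewrite | github.com/Esimseitm/PP2_Spring21 | 3Week/function1/8.py | func
-- ===== SOURCE A (Python) =====
-- def func(lista):
--     arr = []
--     for i in lista:
--         if i == 0 or i == 7:
--             arr.append(i)
--     for i in range(len(arr) - 2):
--         if arr[i] == 0 and arr[i+1] == 0 and arr[i+2] == 7:
--             return True
--     return False
-- ===== SOURCE B (Python) =====
-- def func(lista):
--     zeros = 0
--     for x in lista:
--         if x == 0:
--             zeros += 1
--         elif x == 7:
--             if zeros >= 2:
--                 return True
--             zeros = 0
--     return False
-- ===== Notes on version B (the rewrite author's own statement) =====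
-- stated objective: simpler
-- what changed: Single pass maintaining a consecutive-zero counter (a 7 after >=2 zeros succeeds and any 7 resets the counter), instead of building a filtered list and then scanning index windows of length 3.
import Mathlib
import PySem

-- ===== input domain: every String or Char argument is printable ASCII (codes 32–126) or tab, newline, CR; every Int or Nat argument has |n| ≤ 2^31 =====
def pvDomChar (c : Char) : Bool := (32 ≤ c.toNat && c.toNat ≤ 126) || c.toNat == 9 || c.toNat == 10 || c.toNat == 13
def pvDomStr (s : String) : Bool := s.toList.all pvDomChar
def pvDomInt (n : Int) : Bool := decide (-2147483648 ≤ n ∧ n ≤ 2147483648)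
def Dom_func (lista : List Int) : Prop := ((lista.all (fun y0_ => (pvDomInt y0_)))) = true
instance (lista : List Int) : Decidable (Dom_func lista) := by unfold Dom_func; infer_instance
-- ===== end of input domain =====

-- B fuses A's filter pass and index-window scan into one pass with a consecutive-zero counter (objective: simpler, O(1) extra space).

-- ===== PORT A =====
-- arr = [i for i in lista if i == 0 or i == 7] built by the explicit append loop
def func (lista : List Int) : Bool :=
  let arr := lista.foldl (fun acc i => if i == 0 || i == 7 then acc ++ [i] else acc) []
  -- for i in range(len(arr) - 2): if arr[i]==0 and arr[i+1]==0 and arr[i+2]==7: return True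
  (PySem.List.pyRange 0 ((arr.length : Int) - 2) 1).any (fun i =>
    PySem.List.pyGetD arr i 0 == 0 && PySem.List.pyGetD arr (i + 1) 0 == 0 &&
      PySem.List.pyGetD arr (i + 2) 0 == 7)

-- ===== PORT B =====
def funcAltLoop : List Int → Nat → Bool
  | [], _ => false
  | x :: xs, zeros =>
    if x == 0 then funcAltLoop xs (zeros + 1)
    else if x == 7 then (if 2 ≤ zeros then true else funcAltLoop xs 0)
    else funcAltLoop xs zeros

def func_alt (lista : List Int) : Bool := funcAltLoop lista 0

-- ===== PRECONDITION & SPEC =====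
def Spec_func (lista : List Int) (out : Bool) : Prop := out = func_alt lista
instance (lista : List Int) (out : Bool) : Decidable (Spec_func lista out) := by unfold Spec_func; infer_instance

-- ===== CLAIM (what is proved, stated in full; the proofs are below) =====
def Claim_equal_func : Prop := ∀ (lista : List Int), Dom_func lista → Spec_func lista (func lista)

-- ===== LEMMAS AND PROOFS =====

-- structural "contains consecutive 0,0,7" predicate, the common middle ground
def hasPat : List Int → Bool
  | a :: b :: c :: rest => (a == 0 && b == 0 && c == 7) || hasPat (b :: c :: rest)
  | _ => false

def patHead : List Int → Bool
  | a :: b :: c :: _ => a == 0 && b == 0 && c == 7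
  | _ => false

theorem hasPat_cons (a : Int) (tl : List Int) :
    hasPat (a :: tl) = (patHead (a :: tl) || hasPat tl) := by
  match tl with
  | [] => simp [hasPat, patHead]
  | [b] => simp [hasPat, patHead]
  | b :: c :: rest => simp [hasPat, patHead]

theorem hasPat_iff_exists (l : List Int) :
    hasPat l = true ↔ ∃ (k : Nat) (h : k + 2 < l.length),
      l[k] = 0 ∧ l[k+1] = 0 ∧ l[k+2] = 7 := by
  induction l with
  | nil => simp [hasPat]
  | cons a tl ih =>
    rw [hasPat_cons]
    constructor
    · intro h
      rcases Bool.or_eq_true_iff.mp h with h1 | h2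
      · match tl, h1 with
        | b :: c :: rest, h1 =>
          simp only [patHead, Bool.and_eq_true, beq_iff_eq] at h1
          exact ⟨0, by simp, by simp [h1.1.1, h1.1.2, h1.2]⟩
      · obtain ⟨k, hk, p1, p2, p3⟩ := ih.mp h2
        exact ⟨k + 1, by simpa using Nat.succ_lt_succ hk, by simpa using p1,
          by simpa using p2, by simpa using p3⟩
    · rintro ⟨k, hk, p1, p2, p3⟩
      cases k with
      | zero =>
        apply Bool.or_eq_true_iff.mpr; left
        match tl, hk with
        | b :: c :: rest, _ =>
          simp only [List.getElem_cons_zero] at p1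
          simp only [List.getElem_cons_succ, List.getElem_cons_zero] at p2 p3
          simp [patHead, p1, p2, p3]
      | succ k =>
        apply Bool.or_eq_true_iff.mpr; right
        refine ih.mpr ⟨k, by simpa using Nat.lt_of_succ_lt_succ hk, ?_, ?_, ?_⟩
        · simpa using p1
        · simpa using p2
        · simpa using p3

-- A's window scan equals hasPat
theorem windowScan_eq_hasPat (arr : List Int) :
    ((PySem.List.pyRange 0 ((arr.length : Int) - 2) 1).any (fun i =>
      PySem.List.pyGetD arr i 0 == 0 && PySem.List.pyGetD arr (i + 1) 0 == 0 &&
        PySem.List.pyGetD arr (i + 2) 0 == 7)) = hasPat arr := by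
  rw [Bool.eq_iff_iff, hasPat_iff_exists, List.any_eq_true]
  constructor
  · rintro ⟨i, hi, hcond⟩
    rw [PySem.List.mem_pyRange_one] at hi
    obtain ⟨h0, h2⟩ := hi
    have hlen : i + 2 < (arr.length : Int) := by omega
    have e0 : PySem.List.pyGetD arr i 0 = arr[i.toNat] :=
      PySem.List.pyGetD_eq_getElem arr 0 h0 (by omega)
    have e1 : PySem.List.pyGetD arr (i + 1) 0 = arr[(i+1).toNat] :=
      PySem.List.pyGetD_eq_getElem arr 0 (by omega) (by omega)
    have e2 : PySem.List.pyGetD arr (i + 2) 0 = arr[(i+2).toNat] :=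
      PySem.List.pyGetD_eq_getElem arr 0 (by omega) (by omega)
    simp only [e0, e1, e2, Bool.and_eq_true, beq_iff_eq] at hcond
    have t1 : (i + 1).toNat = i.toNat + 1 := by omega
    have t2 : (i + 2).toNat = i.toNat + 2 := by omega
    simp only [t1, t2] at hcond
    exact ⟨i.toNat, by omega, hcond.1.1, hcond.1.2, hcond.2⟩
  · rintro ⟨k, hk, p1, p2, p3⟩
    refine ⟨(k : Int), ?_, ?_⟩
    · rw [PySem.List.mem_pyRange_one]
      constructor
      · exact Int.natCast_nonneg k
      · omega
    · have e0 : PySem.List.pyGetD arr (k : Int) 0 = arr[((k : Int)).toNat] :=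
        PySem.List.pyGetD_eq_getElem arr 0 (by omega) (by omega)
      have e1 : PySem.List.pyGetD arr ((k : Int) + 1) 0 = arr[(((k : Int)) + 1).toNat] :=
        PySem.List.pyGetD_eq_getElem arr 0 (by omega) (by omega)
      have e2 : PySem.List.pyGetD arr ((k : Int) + 2) 0 = arr[(((k : Int)) + 2).toNat] :=
        PySem.List.pyGetD_eq_getElem arr 0 (by omega) (by omega)
      have t0 : ((k : Int)).toNat = k := by omega
      have t1 : (((k : Int)) + 1).toNat = k + 1 := by omega
      have t2 : (((k : Int)) + 2).toNat = k + 2 := by omega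
      simp only [e0, e1, e2]
      simp only [t0, t1, t2]  -- rewrite the index proofs via getElem congruence
      simp [p1, p2, p3]

-- all-zero lists have no pattern
theorem hasPat_replicate_zero (c : Nat) : hasPat (List.replicate c (0 : Int)) = false := by
  induction c with
  | zero => simp [hasPat]
  | succ n ih =>
    rw [List.replicate_succ, hasPat_cons, ih]
    match n with
    | 0 => simp [patHead]
    | 1 => simp [patHead]
    | Nat.succ (Nat.succ m) => simp [patHead, List.replicate_succ]

theorem hasPat_zeros_seven (c : Nat) (xs : List Int) (hc : 2 ≤ c) :
    hasPat (List.replicate c (0 : Int) ++ 7 :: xs) = true := by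
  obtain ⟨m, rfl⟩ : ∃ m, c = m + 2 := ⟨c - 2, by omega⟩
  clear hc
  induction m with
  | zero => simp [hasPat]
  | succ n ih =>
    have : List.replicate (n + 1 + 2) (0 : Int) ++ 7 :: xs
        = 0 :: (List.replicate (n + 2) (0 : Int) ++ 7 :: xs) := by
      simp [List.replicate_succ]
    rw [this, hasPat_cons, ih, Bool.or_true]

-- patterns cannot start at a 7 or at a lone 0 before a 7
theorem patHead_seven (tl : List Int) : patHead (7 :: tl) = false := by
  match tl with
  | [] => simp [patHead]
  | [b] => simp [patHead]
  | b :: c :: r => simp [patHead]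

theorem patHead_zero_seven (tl : List Int) : patHead (0 :: 7 :: tl) = false := by
  match tl with
  | [] => simp [patHead]
  | b :: r => simp [patHead]

theorem hasPat_seven (xs : List Int) : hasPat (7 :: xs) = hasPat xs := by
  rw [hasPat_cons, patHead_seven, Bool.false_or]

theorem hasPat_zero_seven (xs : List Int) : hasPat (0 :: 7 :: xs) = hasPat xs := by
  rw [hasPat_cons, patHead_zero_seven, Bool.false_or, hasPat_seven]

-- B's loop equals hasPat on lists of 0s and 7s, with the counter as a phantom zero-prefix
theorem funcAltLoop_eq_hasPat (l : List Int) :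
    ∀ (c : Nat), (∀ x ∈ l, x = 0 ∨ x = 7) →
      funcAltLoop l c = hasPat (List.replicate c (0 : Int) ++ l) := by
  induction l with
  | nil => intro c _; simp [funcAltLoop, hasPat_replicate_zero]
  | cons x xs ih =>
    intro c hmem
    rcases hmem x List.mem_cons_self with rfl | rfl
    · have : List.replicate c (0 : Int) ++ 0 :: xs
          = List.replicate (c + 1) (0 : Int) ++ xs := by
        simp [List.replicate_succ']
      rw [this, funcAltLoop]
      simp only [BEq.rfl, if_true]
      exact ih (c + 1) (fun y hy => hmem y (List.mem_cons_of_mem _ hy))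
    · rw [funcAltLoop]
      simp only [show ((7 : Int) == 0) = false by decide, Bool.false_eq_true, if_false,
        BEq.rfl, if_true]
      by_cases hc : 2 ≤ c
      · rw [if_pos hc, hasPat_zeros_seven c xs hc]
      · rw [if_neg hc]
        have hxs := ih 0 (fun y hy => hmem y (List.mem_cons_of_mem _ hy))
        simp only [List.replicate_zero, List.nil_append] at hxs
        rw [hxs]
        interval_cases c
        · simp [hasPat_seven]
        · simp [List.replicate_succ, hasPat_zero_seven]

-- B's loop ignores elements that are neither 0 nor 7
theorem funcAltLoop_filter (l : List Int) :
    ∀ c : Nat, funcAltLoop l c = funcAltLoop (l.filter (fun i => i == 0 || i == 7)) c := by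
  induction l with
  | nil => intro c; simp
  | cons x xs ih =>
    intro c
    by_cases h0 : x = 0
    · subst h0; simp [funcAltLoop, ih]
    · by_cases h7 : x = 7
      · subst h7; simp [funcAltLoop, ih]
      · have hb0 : (x == 0) = false := by simp [h0]
        have hb7 : (x == 7) = false := by simp [h7]
        simp only [funcAltLoop, List.filter_cons, hb0, hb7, Bool.or_self, Bool.false_eq_true,
          if_false]
        exact ih c

theorem foldl_filter (l : List Int) :
    l.foldl (fun acc i => if i == 0 || i == 7 then acc ++ [i] else acc) []
      = l.filter (fun i => i == 0 || i == 7) := by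
  have h : ∀ (l : List Int) (acc : List Int),
      l.foldl (fun acc i => if i == 0 || i == 7 then acc ++ [i] else acc) acc
        = acc ++ l.filter (fun i => i == 0 || i == 7) := by
    intro l
    induction l with
    | nil => intro acc; simp
    | cons x xs ih =>
      intro acc
      by_cases h : (x == 0 || x == 7) = true
      · rw [List.foldl_cons, if_pos h, ih, List.filter_cons, if_pos h]; simp
      · rw [List.foldl_cons, if_neg h, ih, List.filter_cons, if_neg h]
  simpa using h l []

-- ===== VERDICT (by name: the statement is the Claim_ definition above) =====
theorem func_spec : Claim_equal_func := by
  intro lista _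
  unfold Spec_func func func_alt
  rw [foldl_filter, windowScan_eq_hasPat]
  rw [funcAltLoop_filter]
  rw [funcAltLoop_eq_hasPat _ 0 (by
    intro x hx
    have := List.of_mem_filter hx
    rcases Bool.or_eq_true_iff.mp this with h | h
    · left; exact beq_iff_eq.mp h
    · right; exact beq_iff_eq.mp h)]
  simp
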